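-- pv_equiv track=rewrite | github.com/phppk/qr_code_generator | draw_qr_code.py | create_format_bits
-- ===== SOURCE A (Python) =====
-- def create_format_bits(ecc_level, mask_pattern):
--     ecc_map = {"L": 1, "M": 0, "Q": 3, "H": 2}
--     if ecc_level not in ecc_map:
--         raise ValueError(f"Unsupported ECC level: {ecc_level}")
--     if not 0 <= mask_pattern <= 7:
--         raise ValueError("Mask pattern must be in range 0..7.")
--
--     data = (ecc_map[ecc_level] << 3) | mask_pattern
--     shifted = data << 10
--     generator = 0b10100110111
--
--     for i in range(14, 9, -1):
--         if (shifted >> i) & 1: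
--             shifted ^= generator << (i - 10)
--
--     format_bits = (data << 10) | shifted
--     format_bits ^= 0b101010000010010
--     return format(format_bits, "015b")
-- ===== SOURCE B (Python) =====
-- # Table-lookup re-implementation: the 32 possible (ecc,mask) format words are precomputed,
-- # replacing the BCH generator-polynomial division loop with one index into _FORMAT_BITS.
-- _FORMAT_BITS = [
--     21522, 20773, 24188, 23371, 17913, 16590, 20375, 19104,
--     30660, 29427, 32170, 30877, 26159, 25368, 27713, 26998,
--     5769, 5054, 7399, 6608, 1890, 597, 3340, 2107,
--     13663, 12392, 16177, 14854, 9396, 8579, 11994, 11245,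
-- ]
--
-- def create_format_bits(ecc_level, mask_pattern):
--     ecc_map = {"L": 1, "M": 0, "Q": 3, "H": 2}
--     if ecc_level not in ecc_map:
--         raise ValueError(f"Unsupported ECC level: {ecc_level}")
--     if not 0 <= mask_pattern <= 7:
--         raise ValueError("Mask pattern must be in range 0..7.")
--     data = (ecc_map[ecc_level] << 3) | mask_pattern
--     return format(_FORMAT_BITS[data], "015b")
-- ===== Notes on version B (the rewrite author's own statement) =====
-- stated objective: simpler
-- what changed: Replaces the BCH generator-polynomial division loop and final XOR with a single lookup in a precomputed 32-entry table of format words indexed by (ecc<<3)|mask.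
import Mathlib
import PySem

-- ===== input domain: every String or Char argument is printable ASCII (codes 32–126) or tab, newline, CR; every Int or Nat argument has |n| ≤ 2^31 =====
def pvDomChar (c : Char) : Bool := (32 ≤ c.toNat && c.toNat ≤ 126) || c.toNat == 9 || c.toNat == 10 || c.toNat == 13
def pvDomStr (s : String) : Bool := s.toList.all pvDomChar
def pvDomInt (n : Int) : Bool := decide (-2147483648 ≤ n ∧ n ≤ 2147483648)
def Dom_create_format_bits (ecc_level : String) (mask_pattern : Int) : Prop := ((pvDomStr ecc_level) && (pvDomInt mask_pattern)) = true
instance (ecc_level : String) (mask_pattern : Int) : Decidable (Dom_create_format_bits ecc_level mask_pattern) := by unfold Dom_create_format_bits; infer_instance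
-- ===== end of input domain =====

-- B replaces A's BCH division loop + final XOR by one lookup in a precomputed 32-entry
-- table of format words; Pre_ excludes exactly the inputs where A raises ValueError.

-- format(n, "015b") for 0 ≤ n < 2^15: 15 binary digits, MSB first (exact on that range,
-- which covers every value either port formats).
def pvBin15 (n : Nat) : String :=
  String.mk (((List.range 15).reverse).map (fun i => if n >>> i % 2 == 1 then '1' else '0'))

-- ===== PORT A =====
def create_format_bits (ecc_level : String) (mask_pattern : Int) : String :=
  let ecc_map : PySem.Dict String Int := PySem.Dict.ofList [("L", 1), ("M", 0), ("Q", 3), ("H", 2)]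
  match PySem.Dict.get? ecc_map ecc_level with
  | none => ""  -- Python raises ValueError; excluded by Pre_
  | some v =>
    if ¬ (0 ≤ mask_pattern ∧ mask_pattern ≤ 7) then ""  -- raise; excluded by Pre_
    else
      -- under the guards v ∈ {0,1,2,3} and 0 ≤ mask_pattern ≤ 7, so Nat bit ops are exact
      let data : Nat := (v.toNat <<< 3) ||| mask_pattern.toNat
      let shifted : Nat := data <<< 10
      let generator : Nat := 0b10100110111
      let shifted := List.foldl
        (fun s i => if (s >>> i) % 2 == 1 then s ^^^ (generator <<< (i - 10)) else s)
        shifted [14, 13, 12, 11, 10]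
      let format_bits := (data <<< 10) ||| shifted
      let format_bits := format_bits ^^^ 0b101010000010010
      pvBin15 format_bits

-- ===== PORT B =====
def pvFormatTable : List Nat :=
  [21522, 20773, 24188, 23371, 17913, 16590, 20375, 19104,
   30660, 29427, 32170, 30877, 26159, 25368, 27713, 26998,
   5769, 5054, 7399, 6608, 1890, 597, 3340, 2107,
   13663, 12392, 16177, 14854, 9396, 8579, 11994, 11245]

def create_format_bits_alt (ecc_level : String) (mask_pattern : Int) : String :=
  let ecc_map : PySem.Dict String Int := PySem.Dict.ofList [("L", 1), ("M", 0), ("Q", 3), ("H", 2)]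
  match PySem.Dict.get? ecc_map ecc_level with
  | none => ""  -- Python raises ValueError; excluded by Pre_
  | some v =>
    if ¬ (0 ≤ mask_pattern ∧ mask_pattern ≤ 7) then ""  -- raise; excluded by Pre_
    else
      let data : Nat := (v.toNat <<< 3) ||| mask_pattern.toNat
      pvBin15 (pvFormatTable.getD data 0)

-- ===== PRECONDITION & SPEC =====
-- exactly the inputs on which A returns (otherwise it raises ValueError)
def Pre_create_format_bits (ecc_level : String) (mask_pattern : Int) : Prop :=
  (ecc_level = "L" ∨ ecc_level = "M" ∨ ecc_level = "Q" ∨ ecc_level = "H") ∧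
  0 ≤ mask_pattern ∧ mask_pattern ≤ 7
instance (ecc_level : String) (mask_pattern : Int) : Decidable (Pre_create_format_bits ecc_level mask_pattern) := by unfold Pre_create_format_bits; infer_instance
def pvWitness_create_format_bits : String × Int := ("M", 3)

def Spec_create_format_bits (ecc_level : String) (mask_pattern : Int) (out : String) : Prop := out = create_format_bits_alt ecc_level mask_pattern
instance (ecc_level : String) (mask_pattern : Int) (out : String) : Decidable (Spec_create_format_bits ecc_level mask_pattern out) := by unfold Spec_create_format_bits; infer_instance

-- ===== CLAIM (what is proved, stated in full; the proofs are below) =====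
def Claim_equal_create_format_bits : Prop := ∀ (ecc_level : String) (mask_pattern : Int), Dom_create_format_bits ecc_level mask_pattern → Pre_create_format_bits ecc_level mask_pattern → Spec_create_format_bits ecc_level mask_pattern (create_format_bits ecc_level mask_pattern)

-- ===== LEMMAS AND PROOFS =====

-- ===== VERDICT (by name: the statement is the Claim_ definition above) =====
theorem create_format_bits_spec : Claim_equal_create_format_bits := by
  intro e m _ hpre
  obtain ⟨he, hm0, hm7⟩ := hpre
  have hm : m = 0 ∨ m = 1 ∨ m = 2 ∨ m = 3 ∨ m = 4 ∨ m = 5 ∨ m = 6 ∨ m = 7 := by omega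
  rcases he with rfl | rfl | rfl | rfl <;>
    rcases hm with rfl | rfl | rfl | rfl | rfl | rfl | rfl | rfl <;> decide
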